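-- pv_equiv track=rewrite | github.com/amadeusoff/Polymarket_insider | notifier.py | build_polymarket_url
-- ===== SOURCE A (Python) =====
-- from typing import Dict, Optional
--
-- def build_polymarket_url(trade_data: Dict, alert: Dict = None) -> str:
--     """
--     Build correct Polymarket URL based on market type.
--     Sports: /sports/{league}/{slug}
--     Events: /event/{eventSlug}
--     """
--     # Try to get slug from multiple sources
--     slug = ''
--     event_slug = ''
--
--     if trade_data:
--         slug = trade_data.get('slug', '') or trade_data.get('eventSlug', '')
--         event_slug = trade_data.get('eventSlug', '') or slug
--
--     if alert:
--         slug = slug or alert.get('market_slug', '') or alert.get('event_slug', '')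
--         event_slug = event_slug or alert.get('event_slug', '') or alert.get('market_slug', '') or slug
--
--     if not event_slug:
--         return "https://polymarket.com"
--
--     # Detect sport leagues from slug pattern
--     # Simple sports: /sports/{league}/{slug} works directly
--     sport_prefixes = {
--         'nba-': 'nba', 'nfl-': 'nfl', 'mlb-': 'mlb', 'nhl-': 'nhl',
--         'epl-': 'epl', 'mls-': 'mls', 'ncaa-': 'ncaa', 'wnba-': 'wnba',
--         'elc-': 'efl-championship', 'ufc-': 'mma', 'f1-': 'f1',
--         'tennis-': 'tennis', 'golf-': 'golf'
--     }
--
--     # Esports have complex URL paths (/sports/league-of-legends/games/week/N/slug)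
--     # that we can't reconstruct from slug alone — use event format instead
--     esports_prefixes = {'cs2-', 'dota-', 'lol-', 'val-', 'rl-'}
--
--     for prefix in esports_prefixes:
--         if slug.startswith(prefix) or event_slug.startswith(prefix):
--             return f"https://polymarket.com/event/{event_slug}"
--
--     for prefix, league in sport_prefixes.items():
--         if slug.startswith(prefix) or event_slug.startswith(prefix):
--             return f"https://polymarket.com/sports/{league}/{event_slug}"
--
--     # Default event URL format
--     return f"https://polymarket.com/event/{event_slug}"
-- ===== SOURCE B (Python) =====
-- _TAGS = {
--     'cs2-': 'esports', 'dota-': 'esports', 'lol-': 'esports', 'val-': 'esports', 'rl-': 'esports',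
--     'nba-': 'nba', 'nfl-': 'nfl', 'mlb-': 'mlb', 'nhl-': 'nhl',
--     'epl-': 'epl', 'mls-': 'mls', 'ncaa-': 'ncaa', 'wnba-': 'wnba',
--     'elc-': 'efl-championship', 'ufc-': 'mma', 'f1-': 'f1',
--     'tennis-': 'tennis', 'golf-': 'golf',
-- }
-- _ORDER = list(_TAGS)
--
--
-- def _key(s):
--     """Substring of s up to and including its first '-', or None if s has no '-'."""
--     i = s.find('-')
--     return s[:i + 1] if i >= 0 else None
--
--
-- def build_polymarket_url(trade_data, alert=None):
--     slug = ''
--     event_slug = ''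
--     if trade_data:
--         slug = trade_data.get('slug', '') or trade_data.get('eventSlug', '')
--         event_slug = trade_data.get('eventSlug', '') or slug
--     if alert:
--         slug = slug or alert.get('market_slug', '') or alert.get('event_slug', '')
--         event_slug = event_slug or alert.get('event_slug', '') or alert.get('market_slug', '') or slug
--     if not event_slug:
--         return "https://polymarket.com"
--     hits = [k for k in (_key(slug), _key(event_slug)) if k is not None and k in _TAGS]
--     if hits:
--         tag = _TAGS[min(hits, key=_ORDER.index)]
--         if tag == 'esports':
--             return f"https://polymarket.com/event/{event_slug}"
--         return f"https://polymarket.com/sports/{tag}/{event_slug}"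
--     return f"https://polymarket.com/event/{event_slug}"
-- ===== Notes on version B (the rewrite author's own statement) =====
-- stated objective: alternative
-- what changed: A's two sequential prefix-scan loops (esports set, then sports dict, each running startswith for both strings against every prefix) are replaced by deriving each slug's key (substring up to and including its first '-') once and resolving both keys through a single merged prefix->tag table, taking the earliest-ranked hit; 'esports' is just another tag, so the two-phase priority collapses into table order.
import Mathlib
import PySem

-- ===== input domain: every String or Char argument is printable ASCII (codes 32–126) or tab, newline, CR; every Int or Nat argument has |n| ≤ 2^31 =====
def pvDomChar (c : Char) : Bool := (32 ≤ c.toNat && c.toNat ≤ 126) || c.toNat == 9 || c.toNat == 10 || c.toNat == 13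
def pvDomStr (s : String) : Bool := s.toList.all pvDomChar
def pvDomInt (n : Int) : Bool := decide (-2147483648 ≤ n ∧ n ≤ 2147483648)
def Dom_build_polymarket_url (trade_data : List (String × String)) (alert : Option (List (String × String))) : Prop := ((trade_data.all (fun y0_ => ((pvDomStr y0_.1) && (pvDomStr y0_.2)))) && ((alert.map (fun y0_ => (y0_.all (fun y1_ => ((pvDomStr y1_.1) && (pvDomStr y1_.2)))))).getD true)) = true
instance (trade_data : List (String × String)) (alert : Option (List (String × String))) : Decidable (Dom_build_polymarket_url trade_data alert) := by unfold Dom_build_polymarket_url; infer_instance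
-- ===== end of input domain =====

-- B replaces A's two prefix-scan loops (esports set, sports dict) by one tag table keyed by the
-- slug's "up to first dash" key; objective: alternative (single lookup table, no per-prefix scans).
-- The slug/event_slug resolution lines are identical in both Pythons, hence the shared helper pvResolve.

-- ===== PORT A =====
-- d.get(k, '') on a dict ported as association list: first match, default ''
def pvGet (d : List (String × String)) (k : String) : String :=
  ((d.find? (fun p => p.1 == k)).map Prod.snd).getD ""

-- Python 'x or y' on strings: '' is falsy
def pyOr (a b : String) : String := if a == "" then b else a

-- the slug/event_slug resolution lines (textually identical in A and in B)
def pvResolve (trade_data : List (String × String)) (alert : Option (List (String × String))) : String × String :=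
  let slug := ""
  let event_slug := ""
  let slug := if trade_data.isEmpty then slug else pyOr (pvGet trade_data "slug") (pvGet trade_data "eventSlug")
  let event_slug := if trade_data.isEmpty then event_slug else pyOr (pvGet trade_data "eventSlug") slug
  let al := alert.getD []   -- 'if alert:' is false both for None and for {}
  let slug := if al.isEmpty then slug else pyOr slug (pyOr (pvGet al "market_slug") (pvGet al "event_slug"))
  let event_slug := if al.isEmpty then event_slug else pyOr event_slug (pyOr (pvGet al "event_slug") (pyOr (pvGet al "market_slug") slug))
  (slug, event_slug)

def pvSportPrefixes : List (String × String) :=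
  [("nba-", "nba"), ("nfl-", "nfl"), ("mlb-", "mlb"), ("nhl-", "nhl"),
   ("epl-", "epl"), ("mls-", "mls"), ("ncaa-", "ncaa"), ("wnba-", "wnba"),
   ("elc-", "efl-championship"), ("ufc-", "mma"), ("f1-", "f1"),
   ("tennis-", "tennis"), ("golf-", "golf")]

-- Python iterates a set here; the result does not depend on the iteration order (any hit
-- returns the same string), so a fixed list order is an exact port of the return value.
def pvEsportsPrefixes : List String := ["cs2-", "dota-", "lol-", "val-", "rl-"]

-- the part of A after the '' guard: the two prefix-scan loops and the default return
def pvTailA (slug event_slug : String) : String :=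
  match pvEsportsPrefixes.find? (fun pre => PySem.Str.startswith slug pre || PySem.Str.startswith event_slug pre) with
  | some _ => "https://polymarket.com/event/" ++ event_slug
  | none =>
    match pvSportPrefixes.find? (fun pl => PySem.Str.startswith slug pl.1 || PySem.Str.startswith event_slug pl.1) with
    | some pl => "https://polymarket.com/sports/" ++ pl.2 ++ "/" ++ event_slug
    | none => "https://polymarket.com/event/" ++ event_slug

def build_polymarket_url (trade_data : List (String × String)) (alert : Option (List (String × String))) : String :=
  let r := pvResolve trade_data alert
  if r.2 == "" then "https://polymarket.com" else pvTailA r.1 r.2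

-- ===== PORT B =====
def pvTags : List (String × String) :=
  [("cs2-", "esports"), ("dota-", "esports"), ("lol-", "esports"), ("val-", "esports"), ("rl-", "esports"),
   ("nba-", "nba"), ("nfl-", "nfl"), ("mlb-", "mlb"), ("nhl-", "nhl"),
   ("epl-", "epl"), ("mls-", "mls"), ("ncaa-", "ncaa"), ("wnba-", "wnba"),
   ("elc-", "efl-championship"), ("ufc-", "mma"), ("f1-", "f1"),
   ("tennis-", "tennis"), ("golf-", "golf")]

-- _ORDER = list(_TAGS)
def pvOrder : List String := pvTags.map Prod.fst

-- _key(s): substring up to and including the first '-', None if there is no '-'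
def pvKey (s : String) : Option String :=
  let i := PySem.Str.find s "-"
  if 0 ≤ i then some (PySem.Str.slice s none (some (i + 1))) else none

-- the part of B after the '' guard: derive the two keys, keep those in the table, take the
-- earliest-ranked one.  _ORDER.index k ported as (index? pvOrder k).getD 0: exact, every hit
-- is an element of _ORDER so index? is never none.
-- _TAGS[best] ported as pvGet pvTags best: exact, best is always a key of _TAGS.
-- the comprehension's per-element step: keep k only when it is not None and a key of _TAGS
def pvHitF (k? : Option String) : Option String :=
  match k? with
  | some k => if pvTags.any (fun pr => pr.1 == k) then some k else none
  | none => none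

def pvTailB (slug event_slug : String) : String :=
  let hits := [pvKey slug, pvKey event_slug].filterMap pvHitF
  match PySem.List.min? hits (fun k => (PySem.List.index? pvOrder k).getD 0) with
  | none => "https://polymarket.com/event/" ++ event_slug
  | some best =>
    let tag := pvGet pvTags best
    if tag == "esports" then "https://polymarket.com/event/" ++ event_slug
    else "https://polymarket.com/sports/" ++ tag ++ "/" ++ event_slug

def build_polymarket_url_alt (trade_data : List (String × String)) (alert : Option (List (String × String))) : String :=
  let r := pvResolve trade_data alert
  if r.2 == "" then "https://polymarket.com" else pvTailB r.1 r.2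

-- ===== PRECONDITION & SPEC =====
def Spec_build_polymarket_url (trade_data : List (String × String)) (alert : Option (List (String × String))) (out : String) : Prop := out = build_polymarket_url_alt trade_data alert
instance (trade_data : List (String × String)) (alert : Option (List (String × String))) (out : String) : Decidable (Spec_build_polymarket_url trade_data alert out) := by unfold Spec_build_polymarket_url; infer_instance

-- ===== CLAIM (what is proved, stated in full; the proofs are below) =====
def Claim_equal_build_polymarket_url : Prop := ∀ (trade_data : List (String × String)) (alert : Option (List (String × String))), Dom_build_polymarket_url trade_data alert → Spec_build_polymarket_url trade_data alert (build_polymarket_url trade_data alert)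

-- ===== LEMMAS AND PROOFS =====

theorem find?_congr' {α : Type} {l : List α} {f g : α → Bool} (h : ∀ x ∈ l, f x = g x) :
    l.find? f = l.find? g := by
  induction l with
  | nil => rfl
  | cons x t ih =>
    simp only [List.find?]
    rw [h x (by simp)]
    cases g x
    · exact ih (fun y hy => h y (by simp [hy]))
    · rfl

-- first '-' in q ++ '-' :: rest sits right after q when q is dash-free
theorem find_go_dash (q rest : List Char) (hq : '-' ∉ q) (k : Nat) :
    PySem.Chars.find.go ['-'] (q ++ '-' :: rest) k = (k : Int) + q.length := by
  induction q generalizing k with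
  | nil => simp [PySem.Chars.find.go, List.isPrefixOf]
  | cons c q ih =>
    have hc : ('-' == c) = false := by
      simp only [List.mem_cons, not_or] at hq
      simp only [beq_eq_false_iff_ne, ne_eq]
      exact hq.1
    simp only [List.cons_append, PySem.Chars.find.go, List.isPrefixOf, hc, Bool.false_and,
      if_neg Bool.false_ne_true]
    rw [ih (fun h => hq (List.mem_cons_of_mem _ h)) (k + 1)]
    simp only [List.length_cons]
    push_cast
    ring

theorem pvKey_of_startswith (s p : String) (q : List Char) (hp : p.toList = q ++ ['-'])
    (hq : '-' ∉ q) (h : PySem.Str.startswith s p = true) : pvKey s = some p := by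
  rw [PySem.Str.startswith_eq] at h
  obtain ⟨rest, hrest⟩ := (PySem.Chars.startswith_iff _ _).1 h
  have hs : s.toList = q ++ '-' :: rest := by
    rw [← hrest, hp]; simp
  have hfind : PySem.Str.find s "-" = (q.length : Int) := by
    rw [PySem.Str.find_eq]
    show PySem.Chars.find s.toList ['-'] = _
    rw [hs]
    show PySem.Chars.find.go ['-'] _ 0 = _
    rw [find_go_dash q rest hq 0]
    simp
  simp only [pvKey, hfind, if_pos (by positivity : (0:Int) ≤ (q.length : Int))]
  congr 1
  apply String.toList_inj.mp
  rw [PySem.Str.toList_slice, PySem.Chars.slice_eq_listSlice,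
    PySem.List.slice_to _ (by positivity), hs, hp]
  rw [show ((q.length : Int) + 1).toNat = q.length + 1 by omega]
  rw [show q ++ '-' :: rest = (q ++ ['-']) ++ rest by simp]
  exact List.take_left' (by simp)

theorem startswith_of_pvKey (s p : String) (h : pvKey s = some p) :
    PySem.Str.startswith s p = true := by
  simp only [pvKey] at h
  by_cases h0 : (0:Int) ≤ PySem.Str.find s "-"
  · rw [if_pos h0] at h
    rw [PySem.Str.startswith_eq]
    apply (PySem.Chars.startswith_iff _ _).2
    rw [← Option.some_inj.mp h]
    rw [PySem.Str.toList_slice, PySem.Chars.slice_eq_listSlice, PySem.List.slice_to _ (by omega)]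
    exact List.take_prefix _ _
  · rw [if_neg h0] at h
    exact absurd h (by simp)

def pvKeysList : List String :=
  ["cs2-", "dota-", "lol-", "val-", "rl-", "nba-", "nfl-", "mlb-", "nhl-", "epl-", "mls-",
   "ncaa-", "wnba-", "elc-", "ufc-", "f1-", "tennis-", "golf-"]

theorem sw_eq_of (p : String) (q : List Char) (hp : p.toList = q ++ ['-']) (hq : '-' ∉ q)
    (s : String) : PySem.Str.startswith s p = (pvKey s == some p) := by
  by_cases h : pvKey s = some p
  · rw [h, startswith_of_pvKey s p h]
    simp
  · have hsw : PySem.Str.startswith s p = false := by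
      cases hsw : PySem.Str.startswith s p
      · rfl
      · exact absurd (pvKey_of_startswith s p q hp hq hsw) h
    rw [hsw]
    symm
    simp [h]

theorem sw_eq (s p : String) (hp : p ∈ pvKeysList) :
    PySem.Str.startswith s p = (pvKey s == some p) := by
  fin_cases hp
  · exact sw_eq_of _ ['c', 's', '2'] rfl (by decide) s
  · exact sw_eq_of _ ['d', 'o', 't', 'a'] rfl (by decide) s
  · exact sw_eq_of _ ['l', 'o', 'l'] rfl (by decide) s
  · exact sw_eq_of _ ['v', 'a', 'l'] rfl (by decide) s
  · exact sw_eq_of _ ['r', 'l'] rfl (by decide) s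
  · exact sw_eq_of _ ['n', 'b', 'a'] rfl (by decide) s
  · exact sw_eq_of _ ['n', 'f', 'l'] rfl (by decide) s
  · exact sw_eq_of _ ['m', 'l', 'b'] rfl (by decide) s
  · exact sw_eq_of _ ['n', 'h', 'l'] rfl (by decide) s
  · exact sw_eq_of _ ['e', 'p', 'l'] rfl (by decide) s
  · exact sw_eq_of _ ['m', 'l', 's'] rfl (by decide) s
  · exact sw_eq_of _ ['n', 'c', 'a', 'a'] rfl (by decide) s
  · exact sw_eq_of _ ['w', 'n', 'b', 'a'] rfl (by decide) s
  · exact sw_eq_of _ ['e', 'l', 'c'] rfl (by decide) s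
  · exact sw_eq_of _ ['u', 'f', 'c'] rfl (by decide) s
  · exact sw_eq_of _ ['f', '1'] rfl (by decide) s
  · exact sw_eq_of _ ['t', 'e', 'n', 'n', 'i', 's'] rfl (by decide) s
  · exact sw_eq_of _ ['g', 'o', 'l', 'f'] rfl (by decide) s

def render (t? : Option String) (es : String) : String :=
  match t? with
  | none => "https://polymarket.com/event/" ++ es
  | some t =>
    if t == "esports" then "https://polymarket.com/event/" ++ es
    else "https://polymarket.com/sports/" ++ t ++ "/" ++ es

def AfSel (a b : Option String) : Option String :=
  match pvEsportsPrefixes.find? (fun p => a == some p || b == some p) with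
  | some _ => some "esports"
  | none => (pvSportPrefixes.find? (fun pl => a == some pl.1 || b == some pl.1)).map Prod.snd

def BfSel (a b : Option String) : Option String :=
  (PySem.List.min? ([a, b].filterMap pvHitF)
    (fun k => (PySem.List.index? pvOrder k).getD 0)).map (fun best => pvGet pvTags best)

theorem tailB_eq (slug es : String) :
    pvTailB slug es = render (BfSel (pvKey slug) (pvKey es)) es := by
  unfold pvTailB BfSel
  cases h : PySem.List.min? ([pvKey slug, pvKey es].filterMap pvHitF)
    (fun k => (PySem.List.index? pvOrder k).getD 0) with
  | none => simp only [h, render, Option.map_none]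
  | some best => simp only [h, render, Option.map_some]

theorem tailA_eq (slug es : String) :
    pvTailA slug es = render (AfSel (pvKey slug) (pvKey es)) es := by
  unfold pvTailA AfSel
  rw [find?_congr' (l := pvEsportsPrefixes)
    (g := fun p => pvKey slug == some p || pvKey es == some p)
    (fun x hx => by
      have hxK : x ∈ pvKeysList := by fin_cases hx <;> decide
      rw [sw_eq slug x hxK, sw_eq es x hxK])]
  rw [find?_congr' (l := pvSportPrefixes)
    (g := fun pl => pvKey slug == some pl.1 || pvKey es == some pl.1)
    (fun x hx => by
      have hxK : x.1 ∈ pvKeysList := by fin_cases hx <;> decide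
      rw [sw_eq slug x.1 hxK, sw_eq es x.1 hxK])]
  cases h1 : pvEsportsPrefixes.find? (fun p => pvKey slug == some p || pvKey es == some p) with
  | some _ => rfl
  | none =>
    cases h2 : pvSportPrefixes.find?
        (fun pl => pvKey slug == some pl.1 || pvKey es == some pl.1) with
    | none => rfl
    | some pl =>
      have hm : pl ∈ pvSportPrefixes := List.mem_of_find?_eq_some h2
      have htag : (pl.2 == "esports") = false := by
        have hall : ∀ x ∈ pvSportPrefixes, (x.2 == "esports") = false := by decide
        exact hall pl hm
      simp [render, htag]

theorem beq_false_of_not_key (x : String) (hx : pvTags.any (fun pr => pr.1 == x) = false)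
    (p : String) (hp : p ∈ pvKeysList) : ((some x : Option String) == some p) = false := by
  have hall := List.any_eq_false.mp hx
  have hpx : ∃ pr ∈ pvTags, pr.1 = p := by fin_cases hp <;> decide
  obtain ⟨pr, hpr, he⟩ := hpx
  have hne : p ≠ x := he ▸ (by simpa using hall pr hpr)
  simp only [beq_eq_false_iff_ne, ne_eq, Option.some.injEq]
  exact fun hxp => hne hxp.symm

theorem AfSel_normL (a b : Option String) : AfSel a b = AfSel (pvHitF a) b := by
  cases a with
  | none => rfl
  | some x =>
    by_cases hx : pvTags.any (fun pr => pr.1 == x) = true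
    · simp only [pvHitF, if_pos hx]
    · have hx' : pvTags.any (fun pr => pr.1 == x) = false := Bool.eq_false_iff.mpr hx
      have ha : ∀ p ∈ pvKeysList, ((some x : Option String) == some p) = false :=
        beq_false_of_not_key x hx'
      simp only [pvHitF, hx', Bool.false_eq_true, if_false]
      unfold AfSel
      rw [find?_congr' (l := pvEsportsPrefixes)
        (f := fun p => (some x : Option String) == some p || b == some p)
        (g := fun p => (none : Option String) == some p || b == some p)
        (fun p hp => by
          show ((some x : Option String) == some p || b == some p)
            = ((none : Option String) == some p || b == some p)
          rw [ha p (by fin_cases hp <;> decide)]; rfl)]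
      rw [find?_congr' (l := pvSportPrefixes)
        (f := fun pl => (some x : Option String) == some pl.1 || b == some pl.1)
        (g := fun pl => (none : Option String) == some pl.1 || b == some pl.1)
        (fun pl hpl => by
          show ((some x : Option String) == some pl.1 || b == some pl.1)
            = ((none : Option String) == some pl.1 || b == some pl.1)
          rw [ha pl.1 (by fin_cases hpl <;> decide)]; rfl)]

theorem AfSel_normR (a b : Option String) : AfSel a b = AfSel a (pvHitF b) := by
  cases b with
  | none => rfl
  | some x =>
    by_cases hx : pvTags.any (fun pr => pr.1 == x) = true
    · simp only [pvHitF, if_pos hx]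
    · have hx' : pvTags.any (fun pr => pr.1 == x) = false := Bool.eq_false_iff.mpr hx
      have hb : ∀ p ∈ pvKeysList, ((some x : Option String) == some p) = false :=
        beq_false_of_not_key x hx'
      simp only [pvHitF, hx', Bool.false_eq_true, if_false]
      unfold AfSel
      rw [find?_congr' (l := pvEsportsPrefixes)
        (f := fun p => a == some p || (some x : Option String) == some p)
        (g := fun p => a == some p || (none : Option String) == some p)
        (fun p hp => by
          show (a == some p || (some x : Option String) == some p)
            = (a == some p || (none : Option String) == some p)
          rw [hb p (by fin_cases hp <;> decide)]; rfl)]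
      rw [find?_congr' (l := pvSportPrefixes)
        (f := fun pl => a == some pl.1 || (some x : Option String) == some pl.1)
        (g := fun pl => a == some pl.1 || (none : Option String) == some pl.1)
        (fun pl hpl => by
          show (a == some pl.1 || (some x : Option String) == some pl.1)
            = (a == some pl.1 || (none : Option String) == some pl.1)
          rw [hb pl.1 (by fin_cases hpl <;> decide)]; rfl)]

theorem AfSel_norm (a b : Option String) : AfSel a b = AfSel (pvHitF a) (pvHitF b) := by
  rw [AfSel_normL, AfSel_normR]

theorem hitF_idem (o : Option String) : pvHitF (pvHitF o) = pvHitF o := by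
  cases o with
  | none => rfl
  | some x =>
    by_cases hx : pvTags.any (fun pr => pr.1 == x) = true
    · simp [pvHitF, hx]
    · simp [pvHitF, hx]

theorem BfSel_norm (a b : Option String) : BfSel a b = BfSel (pvHitF a) (pvHitF b) := by
  unfold BfSel
  simp only [List.filterMap_cons, List.filterMap_nil, hitF_idem]

def pvAllKeys : List (Option String) := none :: pvKeysList.map some

theorem hitF_mem (o : Option String) : pvHitF o ∈ pvAllKeys := by
  cases o with
  | none => simp [pvHitF, pvAllKeys]
  | some x =>
    by_cases hx : pvTags.any (fun pr => pr.1 == x) = true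
    · simp only [pvHitF, if_pos hx]
      obtain ⟨pr, hpr, he⟩ := List.any_eq_true.mp hx
      have hsub : ∀ pr ∈ pvTags, pr.1 ∈ pvKeysList := by decide
      have : x ∈ pvKeysList := (eq_of_beq he) ▸ hsub pr hpr
      simp [pvAllKeys, this]
    · simp [pvHitF, hx, pvAllKeys]

theorem sel_eq_all : ∀ a ∈ pvAllKeys, ∀ b ∈ pvAllKeys, AfSel a b = BfSel a b := by decide

theorem tails_eq (slug es : String) : pvTailA slug es = pvTailB slug es := by
  rw [tailA_eq, tailB_eq, AfSel_norm, BfSel_norm]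
  congr 1
  exact sel_eq_all _ (hitF_mem _) _ (hitF_mem _)

-- ===== VERDICT (by name: the statement is the Claim_ definition above) =====
theorem build_polymarket_url_spec : Claim_equal_build_polymarket_url := by
  intro trade_data alert _
  unfold Spec_build_polymarket_url build_polymarket_url build_polymarket_url_alt
  simp only [tails_eq]
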